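-- pv_equiv track=rewrite | github.com/chldppwls12/StudyTocoteAllsolve | BOJ/15686_치킨배달/chldppwls12.py | solution
-- ===== SOURCE A (Python) =====
-- from itertools import combinations
--
-- def dist(c1, c2):
--   x1, y1 = c1
--   x2, y2 = c2
--   return abs(x1-x2) + abs(y1-y2)
--
-- def solution(n, m, g):
--   houses = []
--   chickens = []
--
--   for i in range(n):
--     for j, val in enumerate(g[i]):
--       if val == 1:
--         houses.append((i,j))
--       elif val == 2:
--         chickens.append((i,j))
--
--   ans = 987654321
--   for com in combinations(chickens, m):
--     tot = 0
--     for house in houses: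
--       tot += min(dist(house, chicken) for chicken in com)
--
--     ans = min(ans, tot)
--
--   return ans
-- ===== SOURCE B (Python) =====
-- def solution(n, m, g):
--     INF = 987654321
--     houses = [(i, j) for i in range(n) for j, v in enumerate(g[i]) if v == 1]
--     chickens = [(i, j) for i in range(n) for j, v in enumerate(g[i]) if v == 2]
--
--     def dfs(chs, k, dists):
--         # dists[h] = distance from house h to the nearest chicken chosen so far
--         if k == 0:
--             return sum(dists)
--         if len(chs) < k:
--             return INF
--         ci, cj = chs[0]
--         rest = chs[1:]
--         taken = dfs(rest, k - 1,
--                     [min(d, abs(hi - ci) + abs(hj - cj))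
--                      for d, (hi, hj) in zip(dists, houses)])
--         return min(taken, dfs(rest, k, dists))
--
--     return dfs(chickens, m, [INF] * len(houses))
-- ===== Notes on version B (the rewrite author's own statement) =====
-- stated objective: alternative
-- what changed: Replaces the itertools.combinations enumeration with per-combination min recomputation by a take/skip DFS over the chicken list that carries a running per-house nearest-distance array, so prefix minima are shared between combinations with a common prefix.
import Mathlib
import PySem

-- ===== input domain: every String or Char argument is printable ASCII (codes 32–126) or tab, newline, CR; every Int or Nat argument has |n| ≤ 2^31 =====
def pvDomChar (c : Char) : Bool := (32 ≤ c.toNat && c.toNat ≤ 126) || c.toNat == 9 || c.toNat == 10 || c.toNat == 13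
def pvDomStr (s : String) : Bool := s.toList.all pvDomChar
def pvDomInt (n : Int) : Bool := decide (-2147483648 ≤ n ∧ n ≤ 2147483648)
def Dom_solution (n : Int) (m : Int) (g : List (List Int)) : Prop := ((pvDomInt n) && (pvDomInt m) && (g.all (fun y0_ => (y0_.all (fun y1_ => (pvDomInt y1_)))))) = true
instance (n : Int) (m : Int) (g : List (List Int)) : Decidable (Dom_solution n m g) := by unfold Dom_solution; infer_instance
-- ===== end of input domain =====

-- B replaces the combinations() enumeration (per-combination min recomputation) by a
-- take/skip DFS over the chicken list carrying a running per-house nearest-distance array.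

-- ===== PORT A =====
-- dist((x1,y1),(x2,y2)) = abs(x1-x2)+abs(y1-y2)
def pvDist (c1 c2 : Int × Int) : Int := |c1.1 - c2.1| + |c1.2 - c2.2|

-- itertools.combinations(xs, r) in Python's order (r = m.toNat is faithful since Pre_ gives 0 ≤ m;
-- combinations raises ValueError for negative r, which Pre_ excludes)
def pvCombos {α : Type} : List α → Nat → List (List α)
  | _, 0 => [[]]
  | [], _ + 1 => []
  | x :: xs, k + 1 => (pvCombos xs k).map (x :: ·) ++ pvCombos xs (k + 1)

-- the two accumulation loops building houses and chickens ('for i in range(n): for j, val in enumerate(g[i]) …')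
def pvExtract (n : Int) (g : List (List Int)) : List (Int × Int) × List (Int × Int) :=
  (PySem.List.pyRange 0 n 1).foldl (fun acc i =>
    (PySem.List.enumerate (PySem.List.pyGetD g i []) 0).foldl (fun acc2 jv =>
      if jv.2 = 1 then (acc2.1 ++ [(i, jv.1)], acc2.2)
      else if jv.2 = 2 then (acc2.1, acc2.2 ++ [(i, jv.1)])
      else acc2) acc) ([], [])

-- min(dist(house, chicken) for chicken in com); .getD 0 is unreachable: com is nonempty whenever this runs
def pvMind (house : Int × Int) (com : List (Int × Int)) : Int :=
  (PySem.List.min? (com.map (fun c => pvDist house c)) (fun x => x)).getD 0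

-- 'tot = 0; for house in houses: tot += min(...)'
def pvTotA (houses : List (Int × Int)) (com : List (Int × Int)) : Int :=
  houses.foldl (fun tot house => tot + pvMind house com) 0

def solution (n : Int) (m : Int) (g : List (List Int)) : Int :=
  let hc := pvExtract n g
  (pvCombos hc.2 m.toNat).foldl (fun ans com => min ans (pvTotA hc.1 com)) 987654321

-- ===== PORT B =====
-- the comprehension [(i, j) for i in range(n) for j, v in enumerate(g[i]) if v == sel]
def pvSelect (n : Int) (g : List (List Int)) (sel : Int) : List (Int × Int) :=
  (PySem.List.pyRange 0 n 1).flatMap (fun i =>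
    ((PySem.List.enumerate (PySem.List.pyGetD g i []) 0).filter (fun jv => jv.2 == sel)).map
      (fun jv => (i, jv.1)))

-- dfs(chs, k, dists): take/skip recursion; dists = running nearest distance per house
def pvDfs (houses : List (Int × Int)) (chs : List (Int × Int)) (k : Nat) (dists : List Int) : Int :=
  match k, chs with
  | 0, _ => dists.foldl (· + ·) 0
  | _ + 1, [] => 987654321
  | k' + 1, c :: rest =>
    if rest.length + 1 < k' + 1 then 987654321
    else
      min (pvDfs houses rest k'
            (List.zipWith (fun d h => min d (|h.1 - c.1| + |h.2 - c.2|)) dists houses))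
          (pvDfs houses rest (k' + 1) dists)

def solution_alt (n : Int) (m : Int) (g : List (List Int)) : Int :=
  let houses := pvSelect n g 1
  let chickens := pvSelect n g 2
  pvDfs houses chickens m.toNat (List.replicate houses.length 987654321)

-- ===== PRECONDITION & SPEC =====
-- Pre_ excludes exactly the inputs where A raises: n > len(g) (IndexError on g[i]), m < 0
-- (ValueError from combinations), and m = 0 with at least one house (min() of an empty sequence).
def Pre_solution (n : Int) (m : Int) (g : List (List Int)) : Prop :=
  n ≤ (g.length : Int) ∧ (1 ≤ m ∨ (m = 0 ∧ ∀ row ∈ g.take n.toNat, ¬ (1 ∈ row)))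
instance (n : Int) (m : Int) (g : List (List Int)) : Decidable (Pre_solution n m g) := by
  unfold Pre_solution; infer_instance

def pvWitness_solution : Int × Int × List (List Int) := (2, 1, [[0, 1], [2, 0]])

def Spec_solution (n : Int) (m : Int) (g : List (List Int)) (out : Int) : Prop := out = solution_alt n m g
instance (n : Int) (m : Int) (g : List (List Int)) (out : Int) : Decidable (Spec_solution n m g out) := by unfold Spec_solution; infer_instance

-- ===== CLAIM (what is proved, stated in full; the proofs are below) =====
def Claim_equal_solution : Prop := ∀ (n : Int) (m : Int) (g : List (List Int)), Dom_solution n m g → Pre_solution n m g → Spec_solution n m g (solution n m g)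

-- ===== LEMMAS AND PROOFS =====

-- B's leaf value for one combination, starting from running distances dists
def pvValB (houses : List (Int × Int)) (dists : List Int) (com : List (Int × Int)) : Int :=
  (List.zipWith (fun d h => min d (pvMind h com)) dists houses).foldl (· + ·) 0

lemma pvDist_nonneg (c1 c2 : Int × Int) : 0 ≤ pvDist c1 c2 := by
  unfold pvDist; positivity

lemma combos_length {α : Type} : ∀ (xs : List α) (k : Nat) (com : List α),
    com ∈ pvCombos xs k → com.length = k := by
  intro xs
  induction xs with
  | nil =>
    intro k com h
    cases k with
    | zero => simp [pvCombos] at h; simp [h]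
    | succ k => simp [pvCombos] at h
  | cons x xs ih =>
    intro k com h
    cases k with
    | zero => simp [pvCombos] at h; simp [h]
    | succ k =>
      simp only [pvCombos, List.mem_append, List.mem_map] at h
      rcases h with ⟨c, hc, rfl⟩ | h
      · simp [ih k c hc]
      · exact ih (k + 1) com h

lemma combos_nil_of_short {α : Type} : ∀ (xs : List α) (k : Nat),
    xs.length < k → pvCombos xs k = [] := by
  intro xs
  induction xs with
  | nil =>
    intro k hk
    obtain ⟨k', rfl⟩ : ∃ k', k = k' + 1 := ⟨k - 1, by omega⟩
    rfl
  | cons x xs ih =>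
    intro k hk
    obtain ⟨k', rfl⟩ : ∃ k', k = k' + 1 := ⟨k - 1, by simp at hk; omega⟩
    simp only [List.length_cons] at hk
    simp [pvCombos, ih k' (by omega), ih (k' + 1) (by omega)]

lemma foldl_min_min (l : List Int) (a b : Int) :
    l.foldl min (min a b) = min a (l.foldl min b) := by
  induction l generalizing b with
  | nil => rfl
  | cons x t ih => simp only [List.foldl_cons, min_assoc, ih]

lemma foldl_min_le (l : List Int) (a : Int) : l.foldl min a ≤ a := by
  induction l generalizing a with
  | nil => simp
  | cons x t ih => exact le_trans (ih _) (min_le_left _ _)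

lemma foldl_min_append (l1 l2 : List Int) (a : Int) :
    (l1 ++ l2).foldl min a = min (l1.foldl min a) (l2.foldl min a) := by
  rw [List.foldl_append]
  have h1 : l1.foldl min a = min (l1.foldl min a) a := (min_eq_left (foldl_min_le l1 a)).symm
  conv_lhs => rw [h1]
  rw [foldl_min_min]

lemma mind_single (h c : Int × Int) : pvMind h [c] = pvDist h c := by
  simp [pvMind, PySem.List.min?_id_cons]

lemma mind_cons (h c : Int × Int) (com : List (Int × Int)) (hne : com ≠ []) :
    pvMind h (c :: com) = min (pvDist h c) (pvMind h com) := by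
  obtain ⟨e, t, rfl⟩ : ∃ e t, com = e :: t := by
    cases com with
    | nil => exact absurd rfl hne
    | cons e t => exact ⟨e, t, rfl⟩
  simp only [pvMind, List.map_cons, PySem.List.min?_id_cons, Option.getD_some, List.foldl_cons]
  rw [foldl_min_min]

lemma mind_nonneg (h : Int × Int) (com : List (Int × Int)) : 0 ≤ pvMind h com := by
  cases com with
  | nil => simp [pvMind, PySem.List.min?]
  | cons c t =>
    simp only [pvMind, List.map_cons, PySem.List.min?_id_cons, Option.getD_some]
    rcases PySem.List.foldl_min_mem (t.map (fun c => pvDist h c)) (pvDist h c) with h1 | h1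
    · rw [h1]; exact pvDist_nonneg h c
    · rw [List.mem_map] at h1
      obtain ⟨e, _, he⟩ := h1
      have := pvDist_nonneg h e
      omega

lemma zipWith_zipWith {α β : Type} (f g : α → β → α) (ds : List α) (hs : List β) :
    List.zipWith f (List.zipWith g ds hs) hs = List.zipWith (fun d h => f (g d h) h) ds hs := by
  induction ds generalizing hs with
  | nil => simp
  | cons d ds ih =>
    cases hs with
    | nil => simp
    | cons h hs => simp [ih]

lemma valB_cons (houses : List (Int × Int)) (dists : List Int) (c : Int × Int)
    (com : List (Int × Int)) (hne : com ≠ []) :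
    pvValB houses dists (c :: com)
      = pvValB houses (List.zipWith (fun d h => min d (|h.1 - c.1| + |h.2 - c.2|)) dists houses) com := by
  unfold pvValB
  rw [zipWith_zipWith]
  have hfun : (fun (d : Int) (h : Int × Int) => min (min d (|h.1 - c.1| + |h.2 - c.2|)) (pvMind h com))
      = fun (d : Int) (h : Int × Int) => min d (pvMind h (c :: com)) := by
    funext d h
    rw [mind_cons h c com hne]
    show min (min d (pvDist h c)) (pvMind h com) = min d (min (pvDist h c) (pvMind h com))
    rw [min_assoc]
  rw [hfun]

lemma dfs_eq (houses : List (Int × Int)) :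
    ∀ (chs : List (Int × Int)) (k : Nat) (dists : List Int), 1 ≤ k →
    pvDfs houses chs k dists
      = ((pvCombos chs k).map (fun com => pvValB houses dists com)).foldl min 987654321 := by
  intro chs
  induction chs with
  | nil =>
    intro k dists hk
    obtain ⟨k', rfl⟩ : ∃ k', k = k' + 1 := ⟨k - 1, by omega⟩
    simp [pvDfs, pvCombos]
  | cons c rest ih =>
    intro k dists hk
    obtain ⟨k', rfl⟩ : ∃ k', k = k' + 1 := ⟨k - 1, by omega⟩
    by_cases hsh : rest.length + 1 < k' + 1
    · have h1 : pvCombos rest k' = [] := combos_nil_of_short rest k' (by omega)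
      have h2 : pvCombos rest (k' + 1) = [] := combos_nil_of_short rest (k' + 1) (by omega)
      simp [pvDfs, hsh, pvCombos, h1, h2]
    · have hstep : pvDfs houses (c :: rest) (k' + 1) dists
          = min (pvDfs houses rest k'
                  (List.zipWith (fun d h => min d (|h.1 - c.1| + |h.2 - c.2|)) dists houses))
                (pvDfs houses rest (k' + 1) dists) := by
        rw [pvDfs]; simp [hsh]
      rw [hstep]
      have hcom : pvCombos (c :: rest) (k' + 1)
          = (pvCombos rest k').map (c :: ·) ++ pvCombos rest (k' + 1) := rfl
      rw [hcom, List.map_append, foldl_min_append]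
      rw [ih (k' + 1) dists (by omega)]
      cases k' with
      | zero =>
        -- take branch with k' = 0: a leaf; the only completed combination here is [c]
        have htake : pvDfs houses rest 0
            (List.zipWith (fun d h => min d (|h.1 - c.1| + |h.2 - c.2|)) dists houses)
            = (List.zipWith (fun d h => min d (|h.1 - c.1| + |h.2 - c.2|)) dists houses).foldl (· + ·) 0 := by
          simp [pvDfs]
        rw [htake]
        have hc0 : pvCombos rest 0 = [[]] := by cases rest <;> rfl
        rw [hc0]
        simp only [List.map_cons, List.map_nil, List.foldl_cons, List.foldl_nil]
        have hval : pvValB houses dists [c]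
            = (List.zipWith (fun d h => min d (|h.1 - c.1| + |h.2 - c.2|)) dists houses).foldl (· + ·) 0 := by
          unfold pvValB
          have hfun : (fun (d : Int) (h : Int × Int) => min d (pvMind h [c]))
              = fun (d : Int) (h : Int × Int) => min d (|h.1 - c.1| + |h.2 - c.2|) := by
            funext d h
            rw [mind_single]
            rfl
          rw [hfun]
        rw [← hval]
        have hE : pvDfs houses rest (0 + 1) dists
            = ((pvCombos rest (0 + 1)).map (fun com => pvValB houses dists com)).foldl min 987654321 :=
          ih (0 + 1) dists (by omega)
        have hskip : ((pvCombos rest (0 + 1)).map (fun com => pvValB houses dists com)).foldl min 987654321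
            ≤ 987654321 := foldl_min_le _ _
        omega
      | succ k'' =>
        have hmaps : ((pvCombos rest (k'' + 1)).map (c :: ·)).map (fun com => pvValB houses dists com)
            = (pvCombos rest (k'' + 1)).map (fun com => pvValB houses
                (List.zipWith (fun d h => min d (|h.1 - c.1| + |h.2 - c.2|)) dists houses) com) := by
          rw [List.map_map]
          apply List.map_congr_left
          intro com hcm
          have hlen := combos_length rest (k'' + 1) com hcm
          have hne : com ≠ [] := by intro h; rw [h] at hlen; simp at hlen
          show pvValB houses dists (c :: com) = _
          exact valB_cons houses dists c com hne
        rw [hmaps, ih (k'' + 1) _ (by omega)]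

lemma foldl_min_map_congr (l : List (List (Int × Int))) (f g : List (Int × Int) → Int) (a : Int)
    (h : ∀ x ∈ l, min a (f x) = min a (g x)) :
    (l.map f).foldl min a = (l.map g).foldl min a := by
  induction l with
  | nil => rfl
  | cons x t ih =>
    simp only [List.map_cons, List.foldl_cons]
    rw [min_comm a (f x), foldl_min_min, min_comm a (g x), foldl_min_min,
        ih (fun y hy => h y (List.mem_cons_of_mem x hy))]
    have hF : (t.map g).foldl min a ≤ a := foldl_min_le _ _
    have hx := h x (List.mem_cons_self)
    omega

lemma zipWith_replicate_left {α β : Type} (f : α → β → α) (a : α) (hs : List β) :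
    List.zipWith f (List.replicate hs.length a) hs = hs.map (fun h => f a h) := by
  induction hs with
  | nil => simp
  | cons h hs ih => simpa [List.replicate_succ] using ih

lemma foldl_add_eq_sum (l : List Int) : ∀ a : Int, l.foldl (· + ·) a = a + l.sum := by
  induction l with
  | nil => intro a; simp
  | cons x t ih => intro a; simp [ih, add_assoc]

lemma foldl_add_map (hs : List (Int × Int)) (f : (Int × Int) → Int) :
    ∀ a : Int, hs.foldl (fun acc h => acc + f h) a = a + (hs.map f).sum := by
  induction hs with
  | nil => intro a; simp
  | cons x t ih => intro a; simp [ih, add_assoc]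

lemma cap_sum (l : List Int) (hnn : ∀ x ∈ l, 0 ≤ x) :
    (l.map (fun x => min 987654321 x)).sum ≤ l.sum
    ∧ 0 ≤ (l.map (fun x => min 987654321 x)).sum
    ∧ min 987654321 ((l.map (fun x => min 987654321 x)).sum) = min 987654321 l.sum := by
  induction l with
  | nil => simp
  | cons x t ih =>
    obtain ⟨h1, h2, h3⟩ := ih (fun y hy => hnn y (List.mem_cons_of_mem x hy))
    have hx := hnn x (List.mem_cons_self)
    simp only [List.map_cons, List.sum_cons]
    omega

-- A's inner per-row loop, closed form
lemma extract_inner (i : Int) (l : List (Int × Int)) :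
    ∀ (acc : List (Int × Int) × List (Int × Int)),
    l.foldl (fun acc2 jv =>
        if jv.2 = 1 then (acc2.1 ++ [(i, jv.1)], acc2.2)
        else if jv.2 = 2 then (acc2.1, acc2.2 ++ [(i, jv.1)])
        else acc2) acc
      = (acc.1 ++ (l.filter (fun jv => jv.2 == 1)).map (fun jv => (i, jv.1)),
         acc.2 ++ (l.filter (fun jv => jv.2 == 2)).map (fun jv => (i, jv.1))) := by
  induction l with
  | nil => intro acc; simp
  | cons x t ih =>
    intro acc
    simp only [List.foldl_cons, List.filter_cons]
    by_cases h1 : x.2 = 1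
    · simp [h1, ih]
    · by_cases h2 : x.2 = 2
      · simp [h2, ih]
      · simp [h1, h2, ih]

lemma extract_outer (g : List (List Int)) :
    ∀ (is : List Int) (acc : List (Int × Int) × List (Int × Int)),
    is.foldl (fun acc i =>
      (PySem.List.enumerate (PySem.List.pyGetD g i []) 0).foldl (fun acc2 jv =>
        if jv.2 = 1 then (acc2.1 ++ [(i, jv.1)], acc2.2)
        else if jv.2 = 2 then (acc2.1, acc2.2 ++ [(i, jv.1)])
        else acc2) acc) acc
      = (acc.1 ++ is.flatMap (fun i =>
            ((PySem.List.enumerate (PySem.List.pyGetD g i []) 0).filter (fun jv => jv.2 == 1)).map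
              (fun jv => (i, jv.1))),
         acc.2 ++ is.flatMap (fun i =>
            ((PySem.List.enumerate (PySem.List.pyGetD g i []) 0).filter (fun jv => jv.2 == 2)).map
              (fun jv => (i, jv.1)))) := by
  intro is
  induction is with
  | nil => intro acc; simp
  | cons i t ih =>
    intro acc
    simp only [List.foldl_cons, List.flatMap_cons]
    rw [extract_inner, ih]
    simp

lemma extract_eq (n : Int) (g : List (List Int)) :
    pvExtract n g = (pvSelect n g 1, pvSelect n g 2) := by
  unfold pvExtract pvSelect
  rw [extract_outer]
  simp

lemma select_one_nil (n : Int) (g : List (List Int)) (hlen : n ≤ (g.length : Int))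
    (hnoh : ∀ row ∈ g.take n.toNat, ¬ (1 ∈ row)) : pvSelect n g 1 = [] := by
  unfold pvSelect
  rw [List.flatMap_eq_nil_iff]
  intro i hi
  rw [PySem.List.mem_pyRange_one] at hi
  rw [List.map_eq_nil_iff, List.filter_eq_nil_iff]
  intro jv hjv
  have hrow : PySem.List.pyGetD g i [] = g[i.toNat] := by
    apply PySem.List.pyGetD_eq_getElem
    · exact hi.1
    · omega
  rw [hrow] at hjv
  rw [PySem.List.mem_enumerate_iff] at hjv
  obtain ⟨k, hk, rfl⟩ := hjv
  have hmem : g[i.toNat] ∈ g.take n.toNat := by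
    have hlt : i.toNat < (g.take n.toNat).length := by
      rw [List.length_take]; omega
    have := List.getElem_mem hlt
    rwa [List.getElem_take] at this
  have := hnoh _ hmem
  intro hbeq
  apply this
  rw [beq_iff_eq] at hbeq
  rw [← hbeq]
  exact List.getElem_mem _

-- ===== VERDICT (by name: the statement is the Claim_ definition above) =====
theorem solution_spec : Claim_equal_solution := by
  intro n m g _ hpre
  unfold Spec_solution
  obtain ⟨hlen, hm⟩ := hpre
  show solution n m g = solution_alt n m g
  unfold solution solution_alt
  rw [extract_eq]
  simp only []
  rcases hm with hm1 | ⟨hm0, hnoh⟩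
  · -- m ≥ 1
    have hk : 1 ≤ m.toNat := by omega
    rw [dfs_eq (pvSelect n g 1) (pvSelect n g 2) m.toNat _ hk]
    rw [← List.foldl_map]
    apply foldl_min_map_congr
    intro com hcom
    have hlenc := combos_length _ _ com hcom
    have hne : com ≠ [] := by intro h; rw [h] at hlenc; simp at hlenc; omega
    -- rewrite both totals as sums over the houses list
    have hA : pvTotA (pvSelect n g 1) com = ((pvSelect n g 1).map (fun h => pvMind h com)).sum := by
      unfold pvTotA
      rw [foldl_add_map]
      simp
    have hB : pvValB (pvSelect n g 1) (List.replicate (pvSelect n g 1).length 987654321) com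
        = (((pvSelect n g 1).map (fun h => pvMind h com)).map (fun x => min 987654321 x)).sum := by
      unfold pvValB
      rw [zipWith_replicate_left, foldl_add_eq_sum, List.map_map]
      simp only [Function.comp_def, zero_add]
    rw [hA, hB]
    have hnn : ∀ x ∈ (pvSelect n g 1).map (fun h => pvMind h com), 0 ≤ x := by
      intro x hx
      rw [List.mem_map] at hx
      obtain ⟨h, _, rfl⟩ := hx
      exact mind_nonneg h com
    exact (cap_sum _ hnn).2.2.symm
  · -- m = 0: Pre_ gives that there is no house; both sides are 0
    have hh : pvSelect n g 1 = [] := select_one_nil n g hlen hnoh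
    have hm0' : m.toNat = 0 := by omega
    rw [hh, hm0']
    simp [pvCombos, pvDfs, pvTotA]
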